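-- pv_equiv track=rewrite | github.com/mattmcgrattan/capturemodeltools | gen_json.py | yaml_at
-- ===== SOURCE A (Python) =====
-- def yaml_at(yaml_str):
--     """
--     Quote escape fields with @s in Yaml
--     :param yaml_str: yaml as string
--     :return: yaml as string or None
--     """
--     at_fields = ['@value', '@id', '@context', '@type']
--     if yaml_str:
--         for a in at_fields:
--             repl = '"' + a + '"'
--             yaml_str = yaml_str.replace(a, repl)
--         return yaml_str
--     else:
--         return None
-- ===== SOURCE B (Python) =====
-- def yaml_at(yaml_str):
--     """
--     Quote escape fields with @s in Yaml
--     :param yaml_str: yaml as string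
--     :return: yaml as string or None
--     """
--     if not yaml_str:
--         return None
--     fields = ('@value', '@id', '@context', '@type')
--     out = []
--     i = 0
--     n = len(yaml_str)
--     while i < n:
--         for f in fields:
--             if yaml_str.startswith(f, i):
--                 out.append('"' + f + '"')
--                 i += len(f)
--                 break
--         else:
--             out.append(yaml_str[i])
--             i += 1
--     return ''.join(out)
-- ===== Notes on version B (the rewrite author's own statement) =====
-- stated objective: alternative
-- what changed: Replaces A's four sequential full-string .replace passes by a single left-to-right scan that wraps whichever field name starts at the current position, building the output in one pass.
import Mathlib
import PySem

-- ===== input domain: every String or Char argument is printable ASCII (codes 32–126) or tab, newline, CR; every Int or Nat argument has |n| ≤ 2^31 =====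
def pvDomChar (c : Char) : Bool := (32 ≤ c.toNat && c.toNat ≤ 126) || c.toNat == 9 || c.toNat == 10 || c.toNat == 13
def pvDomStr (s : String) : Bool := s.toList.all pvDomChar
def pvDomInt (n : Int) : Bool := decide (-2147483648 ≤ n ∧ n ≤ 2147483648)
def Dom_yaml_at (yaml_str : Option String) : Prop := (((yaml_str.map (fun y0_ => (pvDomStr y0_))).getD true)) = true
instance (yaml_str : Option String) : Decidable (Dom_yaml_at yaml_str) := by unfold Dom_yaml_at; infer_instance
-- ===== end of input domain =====

-- B replaces A's four sequential full-string .replace passes by one left-to-right scan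
-- that quotes whichever @-field starts at the current position (return value only; A never mutates).

-- ===== PORT A =====
def yaml_at (yaml_str : Option String) : Option String :=
  match yaml_str with
  | none => none
  | some s =>
      if s ≠ "" then
        some ((["@value", "@id", "@context", "@type"]).foldl
          (fun acc a => PySem.Str.replace acc a ("\"" ++ a ++ "\"")) s)
      else none

-- ===== PORT B =====
-- the four field names, as char lists, and the quote-wrapping '"' + f + '"'
def pvV : List Char := ['@', 'v', 'a', 'l', 'u', 'e']
def pvI : List Char := ['@', 'i', 'd']
def pvC : List Char := ['@', 'c', 'o', 'n', 't', 'e', 'x', 't']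
def pvT : List Char := ['@', 't', 'y', 'p', 'e']
def pvQ (f : List Char) : List Char := '"' :: f ++ ['"']

-- the single pass of Source B's while loop: at each position try the four fields in order
def pvEsc : List Char → List Char
  | [] => []
  | c :: t =>
    if pvV.isPrefixOf (c :: t) then pvQ pvV ++ pvEsc (t.drop 5)
    else if pvI.isPrefixOf (c :: t) then pvQ pvI ++ pvEsc (t.drop 2)
    else if pvC.isPrefixOf (c :: t) then pvQ pvC ++ pvEsc (t.drop 7)
    else if pvT.isPrefixOf (c :: t) then pvQ pvT ++ pvEsc (t.drop 4)
    else c :: pvEsc t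
termination_by s => s.length
decreasing_by all_goals simp

def yaml_at_alt (yaml_str : Option String) : Option String :=
  match yaml_str with
  | none => none
  | some s =>
      if s = "" then none
      else some (String.ofList (pvEsc s.toList))

-- ===== PRECONDITION & SPEC =====
def Spec_yaml_at (yaml_str : Option String) (out : Option String) : Prop := out = yaml_at_alt yaml_str
instance (yaml_str : Option String) (out : Option String) : Decidable (Spec_yaml_at yaml_str out) := by unfold Spec_yaml_at; infer_instance

-- ===== CLAIM (what is proved, stated in full; the proofs are below) =====
def Claim_equal_yaml_at : Prop := ∀ (yaml_str : Option String), Dom_yaml_at yaml_str → Spec_yaml_at yaml_str (yaml_at yaml_str)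

-- ===== LEMMAS AND PROOFS =====

-- fuel-free form of PySem.Chars.replace (for a nonempty pattern)
def pvRep (old new : List Char) : List Char → List Char
  | [] => []
  | c :: t =>
    if old.isPrefixOf (c :: t) then new ++ pvRep old new (t.drop (old.length - 1))
    else c :: pvRep old new t
termination_by s => s.length
decreasing_by all_goals simp

lemma pvGo_eq (old new : List Char) (hold : old ≠ []) :
    ∀ fuel l acc, l.length ≤ fuel →
      PySem.Chars.replace.go old new fuel l acc = acc.reverse ++ pvRep old new l := by
  intro fuel
  induction fuel with
  | zero =>
    intro l acc hl
    have : l = [] := by cases l <;> simp_all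
    subst this
    simp [PySem.Chars.replace.go, pvRep]
  | succ n ih =>
    intro l acc hl
    match l with
    | [] => simp [PySem.Chars.replace.go, pvRep]
    | c :: t =>
      rw [PySem.Chars.replace.go]
      by_cases h : old.isPrefixOf (c :: t)
      · rw [if_pos h]
        have hd : List.drop old.length (c :: t) = t.drop (old.length - 1) := by
          cases old with
          | nil => exact absurd rfl hold
          | cons o os => simp
        rw [hd, ih _ _ (by simp at hl ⊢; omega)]
        rw [pvRep, if_pos h]
        simp
      · rw [if_neg h]
        rw [ih _ _ (by simp at hl; omega)]
        rw [pvRep, if_neg h]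
        simp

lemma pvReplace_eq (old new : List Char) (hold : old ≠ []) (s : List Char) :
    PySem.Chars.replace s old new = pvRep old new s := by
  rw [PySem.Chars.replace, if_neg (by simpa using hold)]
  simpa using pvGo_eq old new hold s.length s [] le_rfl

-- a prefix of the single-pattern-replaced string that contains no '"' was already a prefix
lemma pvRep_prefix_back (p m : List Char) :
    ∀ (n : Nat) (l w : List Char), l.length ≤ n → '"' ∉ w →
      w.isPrefixOf (pvRep p ('"' :: m) l) = true → w.isPrefixOf l = true := by
  intro n
  induction n with
  | zero =>
    intro l w hl hq h
    have : l = [] := by cases l <;> simp_all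
    subst this
    simpa [pvRep] using h
  | succ n ih =>
    intro l w hl hq h
    match l with
    | [] => simpa [pvRep] using h
    | c :: t =>
      rw [pvRep] at h
      by_cases hp : p.isPrefixOf (c :: t)
      · rw [if_pos hp] at h
        match w with
        | [] => simp
        | a :: w' =>
          simp [List.isPrefixOf] at h
          exact absurd (h.1 ▸ (List.mem_cons_self : a ∈ a :: w')) (by simp [h.1] at hq)
      · rw [if_neg hp] at h
        match w with
        | [] => simp
        | a :: w' =>
          simp [List.isPrefixOf] at h ⊢
          refine ⟨h.1, ?_⟩
          have := ih t w' (by simp at hl; omega) (fun hx => hq (List.mem_cons_of_mem _ hx)) (by simpa using h.2)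
          simpa using this

lemma pvNoPre (c : Char) (t w q m : List Char) (hq : '"' ∉ w)
    (h : ¬ ('@' :: w).isPrefixOf (c :: t) = true) :
    ¬ ('@' :: w).isPrefixOf (c :: pvRep q ('"' :: m) t) = true := by
  intro hx
  apply h
  simp [List.isPrefixOf] at hx ⊢
  exact ⟨hx.1, by simpa using pvRep_prefix_back q m t.length t w le_rfl hq (by simpa using hx.2)⟩

-- self steps: replacing a field at the very front
lemma pvSelf_V (r : List Char) : pvRep pvV (pvQ pvV) (pvV ++ r) = pvQ pvV ++ pvRep pvV (pvQ pvV) r := by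
  simp [pvRep, pvV, pvQ, List.isPrefixOf]
lemma pvSelf_I (r : List Char) : pvRep pvI (pvQ pvI) (pvI ++ r) = pvQ pvI ++ pvRep pvI (pvQ pvI) r := by
  simp [pvRep, pvI, pvQ, List.isPrefixOf]
lemma pvSelf_C (r : List Char) : pvRep pvC (pvQ pvC) (pvC ++ r) = pvQ pvC ++ pvRep pvC (pvQ pvC) r := by
  simp [pvRep, pvC, pvQ, List.isPrefixOf]
lemma pvSelf_T (r : List Char) : pvRep pvT (pvQ pvT) (pvT ++ r) = pvQ pvT ++ pvRep pvT (pvQ pvT) r := by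
  simp [pvRep, pvT, pvQ, List.isPrefixOf]

-- skip steps: a later pattern never matches inside an earlier (possibly quoted) block
lemma pvSkip_QV_I (b : List Char) : pvRep pvI (pvQ pvI) (pvQ pvV ++ b) = pvQ pvV ++ pvRep pvI (pvQ pvI) b := by
  simp [pvRep, pvV, pvI, pvQ, List.isPrefixOf]
lemma pvSkip_QV_C (b : List Char) : pvRep pvC (pvQ pvC) (pvQ pvV ++ b) = pvQ pvV ++ pvRep pvC (pvQ pvC) b := by
  simp [pvRep, pvV, pvC, pvQ, List.isPrefixOf]
lemma pvSkip_QV_T (b : List Char) : pvRep pvT (pvQ pvT) (pvQ pvV ++ b) = pvQ pvV ++ pvRep pvT (pvQ pvT) b := by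
  simp [pvRep, pvV, pvT, pvQ, List.isPrefixOf]
lemma pvSkip_I_V (b : List Char) : pvRep pvV (pvQ pvV) (pvI ++ b) = pvI ++ pvRep pvV (pvQ pvV) b := by
  simp [pvRep, pvV, pvI, pvQ, List.isPrefixOf]
lemma pvSkip_QI_C (b : List Char) : pvRep pvC (pvQ pvC) (pvQ pvI ++ b) = pvQ pvI ++ pvRep pvC (pvQ pvC) b := by
  simp [pvRep, pvI, pvC, pvQ, List.isPrefixOf]
lemma pvSkip_QI_T (b : List Char) : pvRep pvT (pvQ pvT) (pvQ pvI ++ b) = pvQ pvI ++ pvRep pvT (pvQ pvT) b := by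
  simp [pvRep, pvI, pvT, pvQ, List.isPrefixOf]
lemma pvSkip_C_V (b : List Char) : pvRep pvV (pvQ pvV) (pvC ++ b) = pvC ++ pvRep pvV (pvQ pvV) b := by
  simp [pvRep, pvV, pvC, pvQ, List.isPrefixOf]
lemma pvSkip_C_I (b : List Char) : pvRep pvI (pvQ pvI) (pvC ++ b) = pvC ++ pvRep pvI (pvQ pvI) b := by
  simp [pvRep, pvI, pvC, pvQ, List.isPrefixOf]
lemma pvSkip_QC_T (b : List Char) : pvRep pvT (pvQ pvT) (pvQ pvC ++ b) = pvQ pvC ++ pvRep pvT (pvQ pvT) b := by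
  simp [pvRep, pvC, pvT, pvQ, List.isPrefixOf]
lemma pvSkip_T_V (b : List Char) : pvRep pvV (pvQ pvV) (pvT ++ b) = pvT ++ pvRep pvV (pvQ pvV) b := by
  simp [pvRep, pvV, pvT, pvQ, List.isPrefixOf]
lemma pvSkip_T_I (b : List Char) : pvRep pvI (pvQ pvI) (pvT ++ b) = pvT ++ pvRep pvI (pvQ pvI) b := by
  simp [pvRep, pvI, pvT, pvQ, List.isPrefixOf]
lemma pvSkip_T_C (b : List Char) : pvRep pvC (pvQ pvC) (pvT ++ b) = pvT ++ pvRep pvC (pvQ pvC) b := by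
  simp [pvRep, pvC, pvT, pvQ, List.isPrefixOf]

def pvChain (cs : List Char) : List Char :=
  pvRep pvT (pvQ pvT) (pvRep pvC (pvQ pvC) (pvRep pvI (pvQ pvI) (pvRep pvV (pvQ pvV) cs)))

lemma pvDecompV (c : Char) (t : List Char) (h : pvV.isPrefixOf (c :: t) = true) :
    c = '@' ∧ t = ['v','a','l','u','e'] ++ t.drop 5 := by
  rw [List.isPrefixOf_iff_prefix] at h
  obtain ⟨r, hr⟩ := h
  simp [pvV] at hr
  obtain ⟨h1, h2⟩ := hr
  exact ⟨h1.symm, by simp [← h2]⟩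

lemma pvDecompI (c : Char) (t : List Char) (h : pvI.isPrefixOf (c :: t) = true) :
    c = '@' ∧ t = ['i','d'] ++ t.drop 2 := by
  rw [List.isPrefixOf_iff_prefix] at h
  obtain ⟨r, hr⟩ := h
  simp [pvI] at hr
  obtain ⟨h1, h2⟩ := hr
  exact ⟨h1.symm, by simp [← h2]⟩

lemma pvDecompC (c : Char) (t : List Char) (h : pvC.isPrefixOf (c :: t) = true) :
    c = '@' ∧ t = ['c','o','n','t','e','x','t'] ++ t.drop 7 := by
  rw [List.isPrefixOf_iff_prefix] at h
  obtain ⟨r, hr⟩ := h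
  simp [pvC] at hr
  obtain ⟨h1, h2⟩ := hr
  exact ⟨h1.symm, by simp [← h2]⟩

lemma pvDecompT (c : Char) (t : List Char) (h : pvT.isPrefixOf (c :: t) = true) :
    c = '@' ∧ t = ['t','y','p','e'] ++ t.drop 4 := by
  rw [List.isPrefixOf_iff_prefix] at h
  obtain ⟨r, hr⟩ := h
  simp [pvT] at hr
  obtain ⟨h1, h2⟩ := hr
  exact ⟨h1.symm, by simp [← h2]⟩

lemma pvChain_eq_pvEsc : ∀ cs : List Char, pvChain cs = pvEsc cs := by
  intro cs
  fun_induction pvEsc cs with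
  | case1 => simp [pvChain, pvRep]
  | case2 c t h ih =>
    obtain ⟨hc, ht⟩ := pvDecompV c t h
    subst hc
    have harg : '@' :: t = pvV ++ t.drop 5 := by
      conv_lhs => rw [ht]
      simp [pvV]
    unfold pvChain at ih ⊢
    rw [harg, pvSelf_V, pvSkip_QV_I, pvSkip_QV_C, pvSkip_QV_T, ih]
  | case3 c t h1 h2 ih =>
    obtain ⟨hc, ht⟩ := pvDecompI c t h2
    subst hc
    have harg : '@' :: t = pvI ++ t.drop 2 := by
      conv_lhs => rw [ht]
      simp [pvI]
    unfold pvChain at ih ⊢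
    rw [harg, pvSkip_I_V, pvSelf_I, pvSkip_QI_C, pvSkip_QI_T, ih]
  | case4 c t h1 h2 h3 ih =>
    obtain ⟨hc, ht⟩ := pvDecompC c t h3
    subst hc
    have harg : '@' :: t = pvC ++ t.drop 7 := by
      conv_lhs => rw [ht]
      simp [pvC]
    unfold pvChain at ih ⊢
    rw [harg, pvSkip_C_V, pvSkip_C_I, pvSelf_C, pvSkip_QC_T, ih]
  | case5 c t h1 h2 h3 h4 ih =>
    obtain ⟨hc, ht⟩ := pvDecompT c t h4
    subst hc
    have harg : '@' :: t = pvT ++ t.drop 4 := by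
      conv_lhs => rw [ht]
      simp [pvT]
    unfold pvChain at ih ⊢
    rw [harg, pvSkip_T_V, pvSkip_T_I, pvSkip_T_C, pvSelf_T, ih]
  | case6 c t h1 h2 h3 h4 ih =>
    have e1 : pvRep pvV (pvQ pvV) (c :: t) = c :: pvRep pvV (pvQ pvV) t := by
      rw [pvRep, if_neg h1]
    have n2 : ¬ pvI.isPrefixOf (c :: pvRep pvV (pvQ pvV) t) = true :=
      pvNoPre c t ['i','d'] pvV (pvV ++ ['"']) (by decide) h2
    have e2 : pvRep pvI (pvQ pvI) (c :: pvRep pvV (pvQ pvV) t)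
        = c :: pvRep pvI (pvQ pvI) (pvRep pvV (pvQ pvV) t) := by
      rw [pvRep, if_neg n2]
    have n3a : ¬ pvC.isPrefixOf (c :: pvRep pvV (pvQ pvV) t) = true :=
      pvNoPre c t ['c','o','n','t','e','x','t'] pvV (pvV ++ ['"']) (by decide) h3
    have n3 : ¬ pvC.isPrefixOf (c :: pvRep pvI (pvQ pvI) (pvRep pvV (pvQ pvV) t)) = true :=
      pvNoPre c (pvRep pvV (pvQ pvV) t) ['c','o','n','t','e','x','t'] pvI (pvI ++ ['"']) (by decide) n3a
    have e3 : pvRep pvC (pvQ pvC) (c :: pvRep pvI (pvQ pvI) (pvRep pvV (pvQ pvV) t))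
        = c :: pvRep pvC (pvQ pvC) (pvRep pvI (pvQ pvI) (pvRep pvV (pvQ pvV) t)) := by
      rw [pvRep, if_neg n3]
    have n4a : ¬ pvT.isPrefixOf (c :: pvRep pvV (pvQ pvV) t) = true :=
      pvNoPre c t ['t','y','p','e'] pvV (pvV ++ ['"']) (by decide) h4
    have n4b : ¬ pvT.isPrefixOf (c :: pvRep pvI (pvQ pvI) (pvRep pvV (pvQ pvV) t)) = true :=
      pvNoPre c (pvRep pvV (pvQ pvV) t) ['t','y','p','e'] pvI (pvI ++ ['"']) (by decide) n4a
    have n4 : ¬ pvT.isPrefixOf (c :: pvRep pvC (pvQ pvC) (pvRep pvI (pvQ pvI) (pvRep pvV (pvQ pvV) t))) = true :=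
      pvNoPre c (pvRep pvI (pvQ pvI) (pvRep pvV (pvQ pvV) t)) ['t','y','p','e'] pvC (pvC ++ ['"']) (by decide) n4b
    have e4 : pvRep pvT (pvQ pvT) (c :: pvRep pvC (pvQ pvC) (pvRep pvI (pvQ pvI) (pvRep pvV (pvQ pvV) t)))
        = c :: pvRep pvT (pvQ pvT) (pvRep pvC (pvQ pvC) (pvRep pvI (pvQ pvI) (pvRep pvV (pvQ pvV) t))) := by
      rw [pvRep, if_neg n4]
    unfold pvChain at ih ⊢
    rw [e1, e2, e3, e4, ih]

-- ===== VERDICT (by name: the statement is the Claim_ definition above) =====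
theorem yaml_at_spec : Claim_equal_yaml_at := by
  intro ys _
  unfold Spec_yaml_at
  match ys with
  | none => rfl
  | some s =>
    by_cases hs : s = ""
    · simp [yaml_at, yaml_at_alt, hs]
    · have key : ∀ l : List Char,
          PySem.Chars.replace (PySem.Chars.replace (PySem.Chars.replace (PySem.Chars.replace l pvV (pvQ pvV)) pvI (pvQ pvI)) pvC (pvQ pvC)) pvT (pvQ pvT) = pvEsc l := by
        intro l
        rw [pvReplace_eq _ _ (by decide), pvReplace_eq _ _ (by decide),
            pvReplace_eq _ _ (by decide), pvReplace_eq _ _ (by decide)]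
        exact pvChain_eq_pvEsc l
      have lV : "@value".toList = pvV := by decide
      have lI : "@id".toList = pvI := by decide
      have lC : "@context".toList = pvC := by decide
      have lT : "@type".toList = pvT := by decide
      have qV : ("\"" ++ "@value" ++ "\"").toList = pvQ pvV := by decide
      have qI : ("\"" ++ "@id" ++ "\"").toList = pvQ pvI := by decide
      have qC : ("\"" ++ "@context" ++ "\"").toList = pvQ pvC := by decide
      have qT : ("\"" ++ "@type" ++ "\"").toList = pvQ pvT := by decide
      simp only [yaml_at, yaml_at_alt, List.foldl, PySem.Str.replace]
      rw [if_neg hs, if_pos (show ¬s = "" from hs)]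
      rw [lV, lI, lC, lT, qV, qI, qC, qT]
      simp only [String.toList_ofList]
      rw [key]
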